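-- pv_equiv track=rewrite | github.com/nikitazozoulenko/euler | euler439.py | sum_of_sum_of_divisors
-- ===== SOURCE A (Python) =====
-- import math
--
-- def sum_of_sum_of_divisors(N): #O(sqrt(N)) time complexity
--     div_sum = 0
--     q = int(math.sqrt(N))
--     for i in range(1, q+1):
--         div_sum += (i * (N // i))
--
--     for i in range(1, N//(q+1)+1):
--         m = N // i
--         k = N // (i + 1)
--         div_sum += (i * (m * (m + 1) - k * (k + 1)) // 2)
--         i += 1
--
--     return div_sum
-- ===== SOURCE B (Python) =====
-- def sum_of_sum_of_divisors(N):
--     div_sum = 0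
--     i = 1
--     while i <= N:
--         v = N // i
--         j = N // v
--         div_sum += v * (i + j) * (j - i + 1) // 2
--         i = j + 1
--     return div_sum
-- ===== Notes on version B (the rewrite author's own statement) =====
-- stated objective: simpler
-- what changed: Replaces A's sqrt-split two-loop hyperbola aggregation (small divisors directly, large divisors grouped by quotient value) with a single while-loop that jumps over maximal blocks of equal quotient N//i and adds each block's Gauss-sum contribution; no math.sqrt needed.
import Mathlib
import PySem

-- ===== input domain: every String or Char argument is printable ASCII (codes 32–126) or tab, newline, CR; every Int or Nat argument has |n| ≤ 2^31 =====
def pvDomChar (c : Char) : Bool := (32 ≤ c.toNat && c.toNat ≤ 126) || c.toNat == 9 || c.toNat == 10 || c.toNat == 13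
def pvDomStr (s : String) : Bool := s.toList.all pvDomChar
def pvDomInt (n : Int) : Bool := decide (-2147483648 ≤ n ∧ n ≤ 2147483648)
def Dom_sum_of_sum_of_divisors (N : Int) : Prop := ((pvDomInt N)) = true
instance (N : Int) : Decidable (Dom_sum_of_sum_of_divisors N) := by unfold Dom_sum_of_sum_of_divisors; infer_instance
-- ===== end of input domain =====

-- B replaces A's sqrt-split two-loop hyperbola aggregation by one while-loop jumping
-- over maximal blocks of equal quotient N//i (objective: simpler; equivalence claimed for N ≥ 0;
-- A raises ValueError on negative N via math.sqrt; B's loop body never runs there).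

-- ===== PORT A =====
def sum_of_sum_of_divisors (N : Int) : Int :=
  -- q = int(math.sqrt(N)): for 0 ≤ N ≤ 2^31 (Dom ∩ Pre_) the correctly rounded double sqrt,
  -- truncated to int, equals the integer square root, so this line is exact on the admitted domain;
  -- for negative N math.sqrt raises ValueError (excluded by Pre_).
  let q : Int := Int.sqrt N
  let s1 := (PySem.List.pyRange 1 (q + 1) 1).foldl
    (fun acc i => acc + i * PySem.Int.floordiv N i) 0
  let s2 := (PySem.List.pyRange 1 (PySem.Int.floordiv N (q + 1) + 1) 1).foldl
    (fun acc i =>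
      let m := PySem.Int.floordiv N i
      let k := PySem.Int.floordiv N (i + 1)
      acc + PySem.Int.floordiv (i * (m * (m + 1) - k * (k + 1))) 2) 0
  s1 + s2

-- ===== PORT B =====
-- the while-loop of Source B; the conjunct 1 ≤ i in the guard is the loop's invariant
-- (i starts at 1 and only grows), made explicit only so that termination is provable —
-- on every reachable state the test agrees with Python's `i <= N`.
-- termination measure for pvAltLoop (the port cites it by name in decreasing_by)
theorem pvAltLoop_dec {N i : Int} (h : 1 ≤ i ∧ i ≤ N) :
    (N + 1 - (PySem.Int.floordiv N (PySem.Int.floordiv N i) + 1)).toNat < (N + 1 - i).toNat := by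
  have hv : 1 ≤ PySem.Int.floordiv N i :=
    (PySem.Int.le_floordiv_iff_mul_le (by omega)).mpr (by omega)
  have hvi : (PySem.Int.floordiv N i) * i ≤ N :=
    (PySem.Int.le_floordiv_iff_mul_le (by omega)).mp le_rfl
  have hij : i ≤ PySem.Int.floordiv N (PySem.Int.floordiv N i) :=
    (PySem.Int.le_floordiv_iff_mul_le (by omega)).mpr (by nlinarith)
  omega

def pvAltLoop (N i acc : Int) : Int :=
  if h : 1 ≤ i ∧ i ≤ N then
    let v := PySem.Int.floordiv N i
    let j := PySem.Int.floordiv N v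
    pvAltLoop N (j + 1) (acc + PySem.Int.floordiv (v * (i + j) * (j - i + 1)) 2)
  else acc
termination_by (N + 1 - i).toNat
decreasing_by exact pvAltLoop_dec h

def sum_of_sum_of_divisors_alt (N : Int) : Int := pvAltLoop N 1 0

-- ===== PRECONDITION & SPEC =====
-- Pre_ excludes exactly the negative N, where Python A raises ValueError (math.sqrt of a negative).
def Pre_sum_of_sum_of_divisors (N : Int) : Prop := 0 ≤ N
instance (N : Int) : Decidable (Pre_sum_of_sum_of_divisors N) := by
  unfold Pre_sum_of_sum_of_divisors; infer_instance

def pvWitness_sum_of_sum_of_divisors : Int := 10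

def Spec_sum_of_sum_of_divisors (N : Int) (out : Int) : Prop := out = sum_of_sum_of_divisors_alt N
instance (N : Int) (out : Int) : Decidable (Spec_sum_of_sum_of_divisors N out) := by
  unfold Spec_sum_of_sum_of_divisors; infer_instance

-- ===== CLAIM (what is proved, stated in full; the proofs are below) =====
def Claim_equal_sum_of_sum_of_divisors : Prop :=
  ∀ (N : Int), Dom_sum_of_sum_of_divisors N → Pre_sum_of_sum_of_divisors N →
    Spec_sum_of_sum_of_divisors N (sum_of_sum_of_divisors N)

-- ===== LEMMAS AND PROOFS =====

-- the reference value: Σ_{a ≤ t < b} t * (N // t)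
def pvS (N a b : Int) : Int :=
  ((PySem.List.pyRange a b 1).map (fun t => t * PySem.Int.floordiv N t)).sum

theorem pvS_nil {N a b : Int} (h : b ≤ a) : pvS N a b = 0 := by
  simp [pvS, PySem.List.pyRange_one_eq_nil h]

theorem pvS_append {N : Int} (a m b : Int) (h1 : a ≤ m) (h2 : m ≤ b) :
    pvS N a b = pvS N a m + pvS N m b := by
  simp [pvS, PySem.List.pyRange_one_append a m b h1 h2]

-- divisor monotonicity: N // j ≤ N // i for 1 ≤ i ≤ j, 0 ≤ N
theorem pv_floordiv_anti {N i j : Int} (hN : 0 ≤ N) (hi : 1 ≤ i) (hij : i ≤ j) :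
    PySem.Int.floordiv N j ≤ PySem.Int.floordiv N i := by
  have h0 : 0 ≤ PySem.Int.floordiv N j :=
    (PySem.Int.le_floordiv_iff_mul_le (by omega)).mpr (by omega)
  have hj : (PySem.Int.floordiv N j) * j ≤ N :=
    (PySem.Int.le_floordiv_iff_mul_le (by omega)).mp le_rfl
  exact (PySem.Int.le_floordiv_iff_mul_le (by omega)).mpr (by nlinarith)

-- on the whole block i ≤ t ≤ N // (N // i), the quotient N // t is constant
theorem pv_quot_const {N i t : Int} (hN : 0 ≤ N) (hi : 1 ≤ i) (hiN : i ≤ N)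
    (hit : i ≤ t) (htj : t ≤ PySem.Int.floordiv N (PySem.Int.floordiv N i)) :
    PySem.Int.floordiv N t = PySem.Int.floordiv N i := by
  have hv : 1 ≤ PySem.Int.floordiv N i :=
    (PySem.Int.le_floordiv_iff_mul_le (by omega)).mpr (by omega)
  have h1 : PySem.Int.floordiv N t ≤ PySem.Int.floordiv N i :=
    pv_floordiv_anti hN hi hit
  have h2 : (PySem.Int.floordiv N i) * t ≤ N := by
    have := (PySem.Int.le_floordiv_iff_mul_le (a := N) (b := PySem.Int.floordiv N i)
      (q := t) (by omega)).mp htj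
    linarith
  have h3 : PySem.Int.floordiv N i ≤ PySem.Int.floordiv N t :=
    (PySem.Int.le_floordiv_iff_mul_le (by omega)).mpr h2
  omega

-- Gauss: twice the sum of t over a ≤ t < b
theorem pv_gauss (v a b : Int) (h : a ≤ b) :
    2 * ((PySem.List.pyRange a b 1).map (fun t => v * t)).sum = v * (a + b - 1) * (b - a) := by
  have hn : ∀ n : Nat, ∀ a : Int,
      2 * ((PySem.List.pyRange a (a + n) 1).map (fun t => v * t)).sum = v * (a + a + n - 1) * n := by
    intro n
    induction n with
    | zero => intro a; simp [PySem.List.pyRange_one_eq_nil (le_refl a)]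
    | succ k ih =>
      intro a
      have h1 : a ≤ a + (k : Int) := by omega
      have : (a + (k + 1 : Nat) : Int) = (a + k) + 1 := by push_cast; ring
      rw [this, PySem.List.pyRange_one_succ_right h1]
      simp only [List.map_append, List.sum_append, List.map_cons, List.map_nil,
        List.sum_cons, List.sum_nil]
      have := ih a
      push_cast
      push_cast at this
      ring_nf
      ring_nf at this
      linarith
  have hb : b = a + ((b - a).toNat : Int) := by omega
  rw [hb, hn (b - a).toNat a]
  have : ((b - a).toNat : Int) = b - a := by omega
  rw [this]; ring_nf

-- the value of one quotient block: Σ_{l ≤ t ≤ r} t*(N//t) when N//t = v throughout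
theorem pv_block_value {N l r v : Int} (hlr : l ≤ r + 1)
    (hconst : ∀ t, l ≤ t → t ≤ r → PySem.Int.floordiv N t = v) :
    2 * pvS N l (r + 1) = v * (l + r) * (r + 1 - l) := by
  have hmap : (PySem.List.pyRange l (r + 1) 1).map (fun t => t * PySem.Int.floordiv N t)
      = (PySem.List.pyRange l (r + 1) 1).map (fun t => v * t) := by
    apply List.map_congr_left
    intro t ht
    have := (PySem.List.mem_pyRange_one (a := l) (b := r + 1) (x := t)).mp ht
    rw [hconst t this.1 (by omega)]; ring
  rw [pvS, hmap, pv_gauss v l (r + 1) hlr]; ring_nf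

-- ===== B's loop =====
theorem pv_altLoop_spec (N : Int) (hN : 0 ≤ N) :
    ∀ n : Nat, ∀ i acc : Int, 1 ≤ i → (N + 1 - i).toNat = n →
      pvAltLoop N i acc = acc + pvS N i (N + 1) := by
  intro n
  induction n using Nat.strong_induction_on with
  | _ n ih =>
    intro i acc hi hn
    rw [pvAltLoop]
    by_cases hiN : i ≤ N
    · simp only [hi, hiN, and_self, dite_true]
      set v := PySem.Int.floordiv N i with hv
      set j := PySem.Int.floordiv N v with hj
      have hv1 : 1 ≤ v := (PySem.Int.le_floordiv_iff_mul_le (by omega)).mpr (by omega)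
      have hvi : v * i ≤ N := (PySem.Int.le_floordiv_iff_mul_le (by omega)).mp le_rfl
      have hij : i ≤ j := (PySem.Int.le_floordiv_iff_mul_le (by omega)).mpr (by nlinarith)
      have hjN : j * v ≤ N := (PySem.Int.le_floordiv_iff_mul_le (by omega)).mp le_rfl
      have hjN' : j ≤ N := by nlinarith
      have hconst : ∀ t, i ≤ t → t ≤ j → PySem.Int.floordiv N t = v := by
        intro t h1 h2; exact pv_quot_const hN hi hiN h1 h2
      have hblock : 2 * pvS N i (j + 1) = v * (i + j) * (j + 1 - i) :=
        pv_block_value (by omega) hconst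
      have hdiv : PySem.Int.floordiv (v * (i + j) * (j - i + 1)) 2 = pvS N i (j + 1) := by
        rw [PySem.Int.floordiv_eq_iff_of_pos (by omega)]
        constructor <;> nlinarith
      rw [ih (N + 1 - (j + 1)).toNat (by omega) (j + 1) _ (by omega) rfl]
      rw [pvS_append i (j + 1) (N + 1) (by omega) (by omega), hdiv]
      ring
    · simp only [hiN, and_false, dite_false]
      rw [pvS_nil (by omega)]; ring

-- ===== A's loops =====
-- telescoping of A's second loop: summing the per-quotient blocks for v = 1..V
-- covers exactly the indices t with N//(V+1) < t ≤ N
theorem pv_second_loop (N : Int) (hN : 0 ≤ N) :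
    ∀ n : Nat, ∀ V : Int, (V : Int) = n →
      ((PySem.List.pyRange 1 (V + 1) 1).map (fun i =>
        let m := PySem.Int.floordiv N i
        let k := PySem.Int.floordiv N (i + 1)
        PySem.Int.floordiv (i * (m * (m + 1) - k * (k + 1))) 2)).sum
      = pvS N (PySem.Int.floordiv N (V + 1) + 1) (N + 1) := by
  intro n
  induction n with
  | zero =>
    intro V hV
    have hV0 : V = 0 := by exact_mod_cast hV
    subst hV0
    have h1 : PySem.Int.floordiv N 1 = N := by
      rw [PySem.Int.floordiv_eq_iff_of_pos (by omega)]; omega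
    simp [PySem.List.pyRange_one_eq_nil (le_refl (1 : Int)), pvS_nil (le_refl (N + 1))]
  | succ d ih =>
    intro V hV
    have hV1 : 1 ≤ V := by omega
    have hstep : PySem.List.pyRange 1 (V + 1) 1
        = PySem.List.pyRange 1 V 1 ++ [V] := by
      have := PySem.List.pyRange_one_succ_right (a := 1) (b := V) (by omega)
      simpa using this
    rw [hstep]
    simp only [List.map_append, List.sum_append, List.map_cons, List.map_nil,
      List.sum_cons, List.sum_nil]
    have hprev : V - 1 = (d : Int) := by omega
    have ihe := ih (V - 1) hprev
    have hVm1 : V - 1 + 1 = V := by omega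
    rw [hVm1] at ihe
    rw [ihe]
    -- the last term is the block (N//(V+1), N//V]
    set k := PySem.Int.floordiv N (V + 1) with hk
    set m := PySem.Int.floordiv N V with hm
    have hkm : k ≤ m := pv_floordiv_anti hN (by omega) (by omega)
    have hk0 : 0 ≤ k := (PySem.Int.le_floordiv_iff_mul_le (by omega)).mpr (by omega)
    have hmN : m * V ≤ N := (PySem.Int.le_floordiv_iff_mul_le (by omega)).mp le_rfl
    have hmN' : m ≤ N := by nlinarith
    have hconst : ∀ t, k + 1 ≤ t → t ≤ m → PySem.Int.floordiv N t = V := by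
      intro t h1 h2
      have ht1 : 1 ≤ t := by omega
      -- V ≤ N//t : t ≤ m = N//V so V*t ≤ N
      have htm : t * V ≤ N := by
        have := (PySem.Int.le_floordiv_iff_mul_le (a := N) (b := V) (q := t) (by omega)).mp h2
        linarith
      have hge : V ≤ PySem.Int.floordiv N t :=
        (PySem.Int.le_floordiv_iff_mul_le (by omega)).mpr (by nlinarith)
      -- N//t < V+1 : k = N//(V+1) < t so N < t*(V+1)
      have hlt' : N < t * (V + 1) :=
        (PySem.Int.floordiv_lt_iff_lt_mul (a := N) (b := V + 1) (q := t) (by omega)).mp (by omega)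
      have hlt : PySem.Int.floordiv N t < V + 1 :=
        (PySem.Int.floordiv_lt_iff_lt_mul (by omega)).mpr (by nlinarith)
      omega
    have hblock : 2 * pvS N (k + 1) (m + 1) = V * (k + 1 + m) * (m + 1 - (k + 1)) :=
      pv_block_value (by omega) hconst
    have hdiv : PySem.Int.floordiv (V * (m * (m + 1) - k * (k + 1))) 2 = pvS N (k + 1) (m + 1) := by
      rw [PySem.Int.floordiv_eq_iff_of_pos (by omega)]
      constructor <;> nlinarith
    rw [hdiv, pvS_append (k + 1) (m + 1) (N + 1) (by omega) (by omega)]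
    ring

-- with q the integer square root and V = N//(q+1) ≥ 1, we get N//(V+1) = q
theorem pv_div_sqrt {N q : Int} (hN : 0 ≤ N) (hq0 : 0 ≤ q)
    (h1 : q * q ≤ N) (h2 : N < (q + 1) * (q + 1))
    (hV : 1 ≤ PySem.Int.floordiv N (q + 1)) :
    PySem.Int.floordiv N (PySem.Int.floordiv N (q + 1) + 1) = q := by
  set V := PySem.Int.floordiv N (q + 1) with hVdef
  have hVle : V * (q + 1) ≤ N := (PySem.Int.le_floordiv_iff_mul_le (by omega)).mp le_rfl
  have hVq : V ≤ q := by nlinarith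
  rw [PySem.Int.floordiv_eq_iff_of_pos (by omega)]
  constructor
  · -- q * (V + 1) ≤ N
    by_contra hcon
    rw [not_le] at hcon
    have hq1 : 1 ≤ q := by nlinarith
    have hNq : PySem.Int.floordiv N q < V + 1 :=
      (PySem.Int.floordiv_lt_iff_lt_mul (by omega)).mpr (by nlinarith)
    have hqNq : q ≤ PySem.Int.floordiv N q :=
      (PySem.Int.le_floordiv_iff_mul_le (by omega)).mpr h1
    have hVNq : V ≤ PySem.Int.floordiv N q := pv_floordiv_anti hN (by omega) (by omega)
    -- so N//q = V = q, but then V(q+1) ≤ N < q(V+1) = V(q+1)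
    have : V = q := by omega
    nlinarith [hVle, hcon, this]
  · -- N < (q + 1) * (V + 1)
    have : PySem.Int.floordiv N (q + 1) < V + 1 := by omega
    have := (PySem.Int.floordiv_lt_iff_lt_mul (a := N) (b := q + 1) (q := V + 1) (by omega)).mp this
    nlinarith

theorem pv_foldl_letform (l : List Int) (a : Int) (N : Int) :
    l.foldl (fun acc i =>
      let m := PySem.Int.floordiv N i
      let k := PySem.Int.floordiv N (i + 1)
      acc + PySem.Int.floordiv (i * (m * (m + 1) - k * (k + 1))) 2) a
    = a + (l.map (fun i =>
      let m := PySem.Int.floordiv N i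
      let k := PySem.Int.floordiv N (i + 1)
      PySem.Int.floordiv (i * (m * (m + 1) - k * (k + 1))) 2)).sum :=
  PySem.List.foldl_add l _ a

theorem pv_A_eq (N : Int) (hN : 0 ≤ N) : sum_of_sum_of_divisors N = pvS N 1 (N + 1) := by
  show (List.foldl (fun acc i => acc + i * PySem.Int.floordiv N i) 0
      (PySem.List.pyRange 1 (Int.sqrt N + 1) 1))
    + (List.foldl (fun acc i =>
        let m := PySem.Int.floordiv N i
        let k := PySem.Int.floordiv N (i + 1)
        acc + PySem.Int.floordiv (i * (m * (m + 1) - k * (k + 1))) 2) 0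
      (PySem.List.pyRange 1 (PySem.Int.floordiv N (Int.sqrt N + 1) + 1) 1))
    = pvS N 1 (N + 1)
  rw [pv_foldl_letform]
  simp only [PySem.List.foldl_add]
  set q := Int.sqrt N with hqdef
  have hq0 : 0 ≤ q := Int.sqrt_nonneg N
  have hqnat : q = ((Nat.sqrt N.toNat : Nat) : Int) := rfl
  have h1 : q * q ≤ N := by
    rw [hqnat]
    have hs := Nat.sqrt_le' N.toNat
    rw [pow_two] at hs
    have hcast : ((Nat.sqrt N.toNat * Nat.sqrt N.toNat : Nat) : Int) ≤ ((N.toNat : Nat) : Int) := by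
      exact_mod_cast hs
    push_cast at hcast
    omega
  have h2 : N < (q + 1) * (q + 1) := by
    rw [hqnat]
    have hs := Nat.lt_succ_sqrt' N.toNat
    rw [pow_two] at hs
    have hcast : ((N.toNat : Nat) : Int) < ((Nat.sqrt N.toNat + 1) * (Nat.sqrt N.toNat + 1) : Nat) := by
      exact_mod_cast hs
    push_cast at hcast
    omega
  have hqN : q ≤ N := by nlinarith
  set V := PySem.Int.floordiv N (q + 1) with hVdef
  have hV0 : 0 ≤ V := (PySem.Int.le_floordiv_iff_mul_le (by omega)).mpr (by omega)
  have hsecond := pv_second_loop N hN V.toNat V (by omega)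
  rw [hsecond]
  by_cases hV1 : 1 ≤ V
  · have hfold := pv_div_sqrt hN hq0 h1 h2 (by rw [← hVdef]; exact hV1)
    rw [← hVdef] at hfold
    rw [hfold]
    rw [pvS_append 1 (q + 1) (N + 1) (by omega) (by omega)]
    simp only [pvS]
    ring
  · -- V = 0: then N < q + 1 so q = N and both tail sums are empty
    have hVz : V = 0 := by omega
    have hNlt : N < 1 * (q + 1) := by
      have := (PySem.Int.floordiv_lt_iff_lt_mul (a := N) (b := q + 1) (q := 1) (by omega)).mp
        (by omega)
      simpa using this
    have hqeq : q = N := by omega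
    have hd1 : PySem.Int.floordiv N (0 + 1) = N := by
      rw [PySem.Int.floordiv_eq_iff_of_pos (by omega)]; omega
    rw [hVz, hd1, pvS_nil (by omega), pvS]
    have : q + 1 = N + 1 := by omega
    rw [this]
    ring

theorem pv_B_eq (N : Int) (hN : 0 ≤ N) : sum_of_sum_of_divisors_alt N = pvS N 1 (N + 1) := by
  unfold sum_of_sum_of_divisors_alt
  rw [pv_altLoop_spec N hN (N + 1 - 1).toNat 1 0 (by omega) rfl]
  ring

-- ===== VERDICT (by name: the statement is the Claim_ definition above) =====
theorem sum_of_sum_of_divisors_spec : Claim_equal_sum_of_sum_of_divisors := by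
  intro N _ hPre
  unfold Spec_sum_of_sum_of_divisors
  rw [pv_A_eq N hPre, pv_B_eq N hPre]
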